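-- pv_equiv track=rewrite | github.com/Migorithm/Algorithm | Algorithm(12)_lowest_common_multiple_denominator.py | solution
-- ===== SOURCE A (Python) =====
-- def solution(n, m):
--     answer = []
--     #최소 공약수
--     for i in range(2, m+1):
--         if m%i ==0 and n%i == 0:
--             answer.append(i)
--             break
--     else:
--         answer.append(1)
--     #최소 공배수 (recursive?)
--     answer.append(lcm(m,n))
--     return answer
--
-- def lcm(m,n):
--     for i in range(2,max(int(m),int(n))): #둘중 큰놈:
--         if m%i ==0 and n%i ==0:
--             a = i
--             return a * lcm(divmod(m,i)[0],divmod(n,i)[0])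
--     #base case
--     return m*n
-- ===== SOURCE B (Python) =====
-- def _gcd(a, b):
--     while b:
--         a, b = b, a % b
--     return a
--
-- def _smallest_factor(g):
--     d = 2
--     while d * d <= g:
--         if g % d == 0:
--             return d
--         d += 1
--     return g
--
-- def solution(n, m):
--     g = _gcd(n, m)
--     return [_smallest_factor(g), n * m // g]
-- ===== Notes on version B (the rewrite author's own statement) =====
-- stated objective: faster
-- what changed: A's linear scan to m for the smallest common divisor and its recursive factor-stripping lcm are replaced by Euclid's gcd, a sqrt-bounded smallest-factor scan of the gcd, and lcm computed directly as n*m//gcd; Pre_ excludes m <= 0, outside the puzzle's positive domain, where A's empty range(2, m+1) yields an accidental first answer of 1 and B divides by gcd 0 at (0,0).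
-- intended difference: When m > 1 divides n and n = m or n < 0, A's lcm recursion stops at its exclusive range(2, max(m,n)) bound before the reduction finishes and returns an overshot product (e.g. [2, 4] for (2, 2)), while B returns the least common multiple [2, 2], the intended value. — e.g. on solution(2, 2): A returns [2, 4], B returns [2, 2]
-- outside the precondition, e.g. on solution(4, -6): A returns [1, -12], B returns [-2, 12]; on solution(6, 0): A returns [1, 0], B returns [2, 0]; on solution(0, 0): A returns [1, 0], B raises ZeroDivisionError
import Mathlib
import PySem

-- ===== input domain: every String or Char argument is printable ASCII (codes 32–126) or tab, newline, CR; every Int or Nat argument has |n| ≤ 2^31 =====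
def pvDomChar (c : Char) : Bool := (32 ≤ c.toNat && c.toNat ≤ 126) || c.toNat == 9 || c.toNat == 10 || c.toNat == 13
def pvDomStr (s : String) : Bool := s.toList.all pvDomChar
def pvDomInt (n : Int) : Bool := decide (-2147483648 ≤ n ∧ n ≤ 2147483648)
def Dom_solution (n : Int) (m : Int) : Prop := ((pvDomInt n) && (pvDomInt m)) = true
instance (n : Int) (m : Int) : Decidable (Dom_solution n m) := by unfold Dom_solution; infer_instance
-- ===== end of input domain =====

-- B replaces A's linear divisor scan and recursive factor-stripping lcm by Euclid's
-- gcd, a √-bounded smallest-factor scan and n*m//gcd (same return value outside D_).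

-- ===== PORT A =====

-- the loop condition `m%i == 0 and n%i == 0` of both of A's scans
def pvCond (m n i : Int) : Bool := PySem.Int.mod m i == 0 && PySem.Int.mod n i == 0

-- A's `for i in range(2, hi): if cond: …` scan, as a first-match search
def pvScanA (m n hi : Int) : Option Int :=
  (PySem.List.pyRange 2 hi 1).find? (fun i => pvCond m n i)

-- dividing a multiple by a factor ≥ 2 at least halves its absolute value (termination helper)
theorem pvNatAbs2 {i : Int} (h : 2 ≤ i) : 2 ≤ i.natAbs :=
  Int.ofNat_le.mp (le_trans (by exact_mod_cast h) Int.le_natAbs)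

-- dividing a multiple by a factor ≥ 2 at least halves its absolute value (termination helper)
theorem pvNatAbsFdivLe (i x : Int) (h2 : 2 ≤ i) (hd : i ∣ x) :
    (PySem.Int.floordiv x i).natAbs * 2 ≤ x.natAbs := by
  obtain ⟨q, rfl⟩ := hd
  rw [PySem.Int.floordiv_eq_ediv_of_pos (lt_of_lt_of_le two_pos h2),
    Int.mul_ediv_cancel_left _ (by omega : i ≠ 0)]
  calc q.natAbs * 2 ≤ q.natAbs * i.natAbs := Nat.mul_le_mul_left _ (pvNatAbs2 h2)
    _ = (i * q).natAbs := by rw [Int.natAbs_mul, Nat.mul_comm]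

-- a found index lies in the range and divides both arguments
theorem pvFindMem {m n hi i : Int} (h : pvScanA m n hi = some i) :
    (2 ≤ i ∧ i < hi) ∧ i ∣ m ∧ i ∣ n := by
  unfold pvScanA at h
  have hmem := List.mem_of_find?_eq_some h
  have hp := List.find?_some h
  unfold pvCond at hp
  simp only [Bool.and_eq_true, beq_iff_eq] at hp
  rw [PySem.Int.mod_eq_zero_iff_dvd, PySem.Int.mod_eq_zero_iff_dvd] at hp
  exact ⟨(PySem.List.mem_pyRange_one).1 hmem, hp⟩

-- small arithmetic steps kept standalone so the termination proof terms stay small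
theorem pvNatAbs3 {m : Int} (h : 3 ≤ m) : 3 ≤ m.natAbs :=
  Int.ofNat_le.mp (le_trans (by exact_mod_cast h) Int.le_natAbs)

theorem pvMax3 {i j : Int} (h2 : 2 ≤ i) (hlt : i < j) : 3 ≤ j := by omega

theorem pvSumLt {A B M N : Nat} (hm : A * 2 ≤ M) (hn : B * 2 ≤ N) (h3 : 3 ≤ M + N) :
    A + B < M + N := by omega

-- termination measure for A's `lcm`: one strict decrease step
theorem pvLcmADec {m n i : Int} (h : pvScanA m n (max m n) = some i) :
    (PySem.Int.floordiv m i).natAbs + (PySem.Int.floordiv n i).natAbs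
      < m.natAbs + n.natAbs := by
  obtain ⟨⟨h2, hlt⟩, hdm, hdn⟩ := pvFindMem h
  have hm := pvNatAbsFdivLe i m h2 hdm
  have hn := pvNatAbsFdivLe i n h2 hdn
  have h3 : 3 ≤ m.natAbs + n.natAbs := by
    rcases le_max_iff.1 (pvMax3 h2 hlt) with h' | h'
    · exact le_trans (pvNatAbs3 h') (Nat.le_add_right _ _)
    · exact le_trans (pvNatAbs3 h') (Nat.le_add_left _ _)
  exact pvSumLt hm hn h3

-- literal port of A's recursive `lcm`
def lcmA (m n : Int) : Int :=
  match h : pvScanA m n (max m n) with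
  | some i => i * lcmA (PySem.Int.floordiv m i) (PySem.Int.floordiv n i)
  | none => m * n
termination_by m.natAbs + n.natAbs
decreasing_by exact pvLcmADec h

def solution (n : Int) (m : Int) : List Int :=
  match pvScanA m n (m + 1) with
  | some i => [i, lcmA m n]
  | none => [1, lcmA m n]

-- ===== PORT B =====

theorem pvAbsLtPos {r b : Int} (h1 : 0 ≤ r) (h2 : r < b) : r.natAbs < b.natAbs := by omega

theorem pvAbsLtNeg {r b : Int} (h1 : b < r) (h2 : r ≤ 0) : r.natAbs < b.natAbs := by omega

-- termination helper for the Euclid loop: |a % b| < |b|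
theorem pvNatAbsModLt (a b : Int) (hb : b ≠ 0) : (PySem.Int.mod a b).natAbs < b.natAbs := by
  rcases lt_or_gt_of_ne hb with h | h
  · obtain ⟨h1, h2⟩ := PySem.Int.mod_neg_bounds a h
    exact pvAbsLtNeg h1 h2
  · exact pvAbsLtPos (PySem.Int.mod_nonneg a h) (PySem.Int.mod_lt a h)

-- `_gcd` from Source B: `while b: a, b = b, a % b`
def pyGcdLoop (a b : Int) : Int :=
  if hb : b = 0 then a else pyGcdLoop b (PySem.Int.mod a b)
termination_by b.natAbs
decreasing_by exact pvNatAbsModLt a b hb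

theorem pvToNatDec {g d : Int} (hd : d ≤ g) :
    (g + 1 - (d + 1)).toNat < (g + 1 - d).toNat := by omega

-- termination measure for the `_smallest_factor` scan
theorem pvSpfDec {g d : Int} (h : d * d ≤ g) :
    (g + 1 - (d + 1)).toNat < (g + 1 - d).toNat := by
  rcases le_or_gt 1 d with hd | hd
  · have h1 : d * 1 ≤ d * d := mul_le_mul_of_nonneg_left hd (le_trans zero_le_one hd)
    exact pvToNatDec (le_trans (by rwa [mul_one] at h1) h)
  · have h0 : (0:Int) ≤ d * d := mul_self_nonneg d
    have hg : (0:Int) ≤ g := le_trans h0 h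
    exact pvToNatDec (by omega)

-- `_smallest_factor` from Source B: `while d * d <= g: …` then `return g`
def pySpfLoop (g d : Int) : Int :=
  if h : d * d ≤ g then
    if PySem.Int.mod g d = 0 then d else pySpfLoop g (d + 1)
  else g
termination_by (g + 1 - d).toNat
decreasing_by exact pvSpfDec h

def solution_alt (n : Int) (m : Int) : List Int :=
  let g := pyGcdLoop n m
  [pySpfLoop g 2, PySem.Int.floordiv (n * m) g]

-- ===== PRECONDITION & SPEC =====
-- Pre_ excludes m ≤ 0, outside the puzzle's positive domain: there A's divisor scan
-- `range(2, m+1)` is empty so its first answer is 1 regardless of common divisors (an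
-- accident of the bound), its lcm value is sign-dependent, and at (0, 0) B divides by gcd 0.
def Pre_solution (n : Int) (m : Int) : Prop := 1 ≤ m
instance (n : Int) (m : Int) : Decidable (Pre_solution n m) := by unfold Pre_solution; infer_instance
def pvWitness_solution : Int × Int := (6, 4)

-- When m > 1 divides n and n = m or n < 0, A's lcm recursion stops at its exclusive
-- `range(2, max(m,n))` bound before the reduction is finished and returns an overshot
-- product (e.g. [2, 4] for (2, 2)), while B returns the least common multiple [2, 2],
-- the intended value.
def D_solution (n : Int) (m : Int) : Prop := 1 < m ∧ m ∣ n ∧ (n = m ∨ n < 0)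
instance (n : Int) (m : Int) : Decidable (D_solution n m) := by unfold D_solution; infer_instance
def Spec_solution (n : Int) (m : Int) (out : List Int) : Prop := ¬ D_solution n m → out = solution_alt n m
instance (n : Int) (m : Int) (out : List Int) : Decidable (Spec_solution n m out) := by unfold Spec_solution; infer_instance
def pvDiffWitness_solution : Int × Int := (2, 2)
def pvDiffWitnessOut_solution : (List Int) × (List Int) := ([2, 4], [2, 2])

-- ===== CLAIM (what is proved, stated in full; the proofs are below) =====
def Claim_unchanged_solution : Prop := ∀ (n : Int) (m : Int), Dom_solution n m → Pre_solution n m → Spec_solution n m (solution n m)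
def Claim_changed_solution : Prop := Dom_solution (pvDiffWitness_solution.1) (pvDiffWitness_solution.2) ∧ Pre_solution (pvDiffWitness_solution.1) (pvDiffWitness_solution.2) ∧ D_solution (pvDiffWitness_solution.1) (pvDiffWitness_solution.2) ∧ solution (pvDiffWitness_solution.1) (pvDiffWitness_solution.2) = pvDiffWitnessOut_solution.1 ∧ solution_alt (pvDiffWitness_solution.1) (pvDiffWitness_solution.2) = pvDiffWitnessOut_solution.2 ∧ pvDiffWitnessOut_solution.1 ≠ pvDiffWitnessOut_solution.2
def Claim_exact_solution : Prop := ∀ (n : Int) (m : Int), Dom_solution n m → Pre_solution n m → D_solution n m → solution n m ≠ solution_alt n m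

-- ===== LEMMAS AND PROOFS =====

-- the Euclid step preserves the gcd
theorem pvGcdEmod (a b : Int) (hb : 0 < b) : Int.gcd b (a % b) = Int.gcd a b := by
  apply Nat.dvd_antisymm
  · apply Nat.dvd_gcd
    · rw [← Int.natAbs_natCast (Int.gcd b (a % b)), Int.natAbs_dvd_natAbs]
      have h1 : (↑(Int.gcd b (a % b)) : Int) ∣ b := Int.gcd_dvd_left b (a % b)
      have h2 : (↑(Int.gcd b (a % b)) : Int) ∣ a % b := Int.gcd_dvd_right b (a % b)
      have h3 := dvd_add (h1.mul_right (a / b)) h2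
      rwa [Int.ediv_add_emod a b] at h3
    · rw [← Int.natAbs_natCast (Int.gcd b (a % b)), Int.natAbs_dvd_natAbs]
      exact Int.gcd_dvd_left b (a % b)
  · apply Nat.dvd_gcd
    · rw [← Int.natAbs_natCast (Int.gcd a b), Int.natAbs_dvd_natAbs]
      exact Int.gcd_dvd_right a b
    · rw [← Int.natAbs_natCast (Int.gcd a b), Int.natAbs_dvd_natAbs]
      have h1 : (↑(Int.gcd a b) : Int) ∣ a := Int.gcd_dvd_left a b
      have h2 : (↑(Int.gcd a b) : Int) ∣ b := Int.gcd_dvd_right a b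
      rw [Int.emod_def]
      exact dvd_sub h1 (h2.mul_right (a / b))

-- the Euclid loop computes the gcd whenever the second argument is positive
theorem pyGcdLoop_eq_gcd (a b : Int) (hb : 0 < b) : pyGcdLoop a b = (Int.gcd a b : Int) := by
  rw [pyGcdLoop, dif_neg (by omega : ¬ b = 0)]
  rw [PySem.Int.mod_eq_emod_of_pos hb]
  rcases eq_or_lt_of_le (Int.emod_nonneg a (by omega : b ≠ 0)) with h0 | h0
  · rw [pyGcdLoop, dif_pos h0.symm]
    rw [← pvGcdEmod a b hb, ← h0, Int.gcd_zero_right]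
    omega
  · rw [pyGcdLoop_eq_gcd b (a % b) h0, pvGcdEmod a b hb]
termination_by b.natAbs
decreasing_by
  have : a % b < b := Int.emod_lt_of_pos a hb
  omega

-- the √-bounded scan computes Nat.minFac
theorem pySpfLoop_eq (g d : Int) (hg : 1 < g) (hd : 2 ≤ d)
    (hmin : d ≤ (Nat.minFac g.toNat : Int)) :
    pySpfLoop g d = (Nat.minFac g.toNat : Int) := by
  have hg1 : g.toNat ≠ 1 := by omega
  have hpdvd : Nat.minFac g.toNat ∣ g.toNat := Nat.minFac_dvd _
  have hpdvdZ : (Nat.minFac g.toNat : Int) ∣ g := by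
    have := Int.natCast_dvd_natCast.2 hpdvd
    rwa [Int.toNat_of_nonneg (by omega : (0:Int) ≤ g)] at this
  rw [pySpfLoop]
  split_ifs with h1 h2
  · have hdvd : d ∣ g := (PySem.Int.mod_eq_zero_iff_dvd g d).1 h2
    have hdvdN : d.toNat ∣ g.toNat := by
      have := Int.natAbs_dvd_natAbs.2 hdvd
      have e1 : d.natAbs = d.toNat := by omega
      have e2 : g.natAbs = g.toNat := by omega
      rwa [e1, e2] at this
    have hle : Nat.minFac g.toNat ≤ d.toNat := Nat.minFac_le_of_dvd (by omega) hdvdN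
    omega
  · have hne : d ≠ (Nat.minFac g.toNat : Int) := by
      intro he
      exact h2 ((PySem.Int.mod_eq_zero_iff_dvd g d).2 (he ▸ hpdvdZ))
    exact pySpfLoop_eq g (d + 1) hg (by omega) (by omega)
  · rcases em (Nat.Prime g.toNat) with hp | hp
    · rw [hp.minFac_eq]; omega
    · exfalso
      have hsq := Nat.minFac_sq_le_self (by omega : 0 < g.toNat) hp
      have : (Nat.minFac g.toNat : Int) * (Nat.minFac g.toNat : Int) ≤ g := by
        have : ((Nat.minFac g.toNat ^ 2 : Nat) : Int) ≤ (g.toNat : Int) := by exact_mod_cast hsq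
        push_cast at this
        rw [Int.toNat_of_nonneg (by omega : (0:Int) ≤ g)] at this
        nlinarith
      nlinarith
termination_by (g + 1 - d).toNat
decreasing_by
  have hdg : d ≤ g := by nlinarith
  omega

theorem pySpfLoop_one : pySpfLoop 1 2 = 1 := by
  rw [pySpfLoop]; norm_num

-- the predicate of A's scans is joint divisibility
theorem pvPred_iff (m n i : Int) : (pvCond m n i = true) ↔ (i ∣ m ∧ i ∣ n) := by
  unfold pvCond
  simp [PySem.Int.mod_eq_zero_iff_dvd]

-- an Int ≥ 0 dividing both m and n divides their gcd (as a Nat)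
theorem pvDvdGcd {i m n : Int} (hi : 0 ≤ i) (h1 : i ∣ m) (h2 : i ∣ n) :
    i.toNat ∣ Int.gcd m n :=
  Int.dvd_gcd (by rwa [Int.toNat_of_nonneg hi]) (by rwa [Int.toNat_of_nonneg hi])

-- A's linear scan from lo finds exactly the least prime factor of gcd(m, n)
theorem find_aux (m n lo hi : Int) (hg : 1 < Int.gcd m n) (hlo : 2 ≤ lo)
    (hmin : lo ≤ (Nat.minFac (Int.gcd m n) : Int)) :
    (PySem.List.pyRange lo hi 1).find? (fun i => pvCond m n i)
      = if ((Nat.minFac (Int.gcd m n) : Int) < hi)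
        then some (Nat.minFac (Int.gcd m n) : Int) else none := by
  have hpdvd : ((Nat.minFac (Int.gcd m n) : Int)) ∣ (Int.gcd m n : Int) :=
    Int.natCast_dvd_natCast.2 (Nat.minFac_dvd _)
  rcases le_or_gt hi lo with hle | hlt
  · rw [PySem.List.pyRange_one_eq_nil hle]
    rw [if_neg (by omega)]
    rfl
  · rw [PySem.List.pyRange_one_cons hlt]
    rcases eq_or_lt_of_le hmin with heq | hltp
    · have hplm : lo ∣ m := heq ▸ (hpdvd.trans (Int.gcd_dvd_left m n))
      have hpln : lo ∣ n := heq ▸ (hpdvd.trans (Int.gcd_dvd_right m n))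
      rw [List.find?_cons_of_pos (p := fun i => pvCond m n i)
        ((pvPred_iff m n lo).2 ⟨hplm, hpln⟩)]
      rw [if_pos (by omega)]
      rw [heq]
    · have hfail : ¬(pvCond m n lo = true) := by
        intro hp
        obtain ⟨h1, h2⟩ := (pvPred_iff m n lo).1 hp
        have hdg : lo.toNat ∣ Int.gcd m n := pvDvdGcd (by omega) h1 h2
        have := Nat.minFac_le_of_dvd (by omega) hdg
        omega
      rw [List.find?_cons_of_neg (p := fun i => pvCond m n i) hfail]
      exact find_aux m n (lo + 1) hi hg (by omega) (by omega)
termination_by (hi - lo).toNat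
decreasing_by omega

theorem find_char (m n hi : Int) (hnz : ¬(m = 0 ∧ n = 0)) :
    pvScanA m n hi
      = if 1 < Int.gcd m n ∧ ((Nat.minFac (Int.gcd m n) : Int) < hi)
        then some (Nat.minFac (Int.gcd m n) : Int) else none := by
  unfold pvScanA
  rcases Nat.lt_or_ge 1 (Int.gcd m n) with hg | hg
  · have h2 : 2 ≤ Nat.minFac (Int.gcd m n) := (Nat.minFac_prime (by omega)).two_le
    rw [find_aux m n 2 hi hg le_rfl (by exact_mod_cast h2)]
    rcases lt_or_ge ((Nat.minFac (Int.gcd m n) : Int)) hi with h | h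
    · rw [if_pos h, if_pos ⟨hg, h⟩]
    · rw [if_neg (by omega), if_neg (fun hc => by omega)]
  · have hg0 : Int.gcd m n ≠ 0 := fun h => hnz (Int.gcd_eq_zero_iff.1 h)
    have hg1 : Int.gcd m n = 1 := by omega
    rw [if_neg (by omega)]
    rw [List.find?_eq_none]
    intro i hmem hp
    have hi2 : 2 ≤ i := (PySem.List.mem_pyRange_one.1 hmem).1
    obtain ⟨h1, h2⟩ := (pvPred_iff m n i).1 hp
    have := pvDvdGcd (by omega) h1 h2
    rw [hg1] at this
    have := Nat.le_of_dvd one_pos this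
    omega

-- the least prime factor of gcd(m,n) divides both
theorem pvMinFacDvd (m n : Int) :
    ((Nat.minFac (Int.gcd m n) : Int)) ∣ m ∧ ((Nat.minFac (Int.gcd m n) : Int)) ∣ n := by
  have h := Int.natCast_dvd_natCast.2 (Nat.minFac_dvd (Int.gcd m n))
  exact ⟨h.trans (Int.gcd_dvd_left m n), h.trans (Int.gcd_dvd_right m n)⟩

-- gcd of common nonnegative multiples
theorem pvGcdMulLeft (p x y : Int) (hp : 0 ≤ p) :
    ((Int.gcd (p * x) (p * y) : Nat) : Int) = p * (Int.gcd x y : Int) := by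
  show ((Nat.gcd (p * x).natAbs (p * y).natAbs : Nat) : Int) = _
  rw [Int.natAbs_mul, Int.natAbs_mul, Nat.gcd_mul_left]
  push_cast
  rw [abs_of_nonneg hp]
  rfl

-- outside D_, A's recursive lcm times the gcd is exactly m * n
theorem lcmA_aux (k : Nat) : ∀ m n : Int, m.natAbs + n.natAbs ≤ k → 1 ≤ m →
    ¬ D_solution n m → lcmA m n * (Int.gcd m n : Int) = m * n := by
  induction k using Nat.strong_induction_on with
  | _ k IH =>
    intro m n hk hm hnd
    have hz : ¬(m = 0 ∧ n = 0) := by omega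
    have hfc := find_char m n (max m n) hz
    have hgdvd : (↑(Int.gcd m n) : Int) ∣ m := Int.gcd_dvd_left m n
    have hgle : (↑(Int.gcd m n) : Int) ≤ m := Int.le_of_dvd (by omega) hgdvd
    have hgpos : 0 < Int.gcd m n := by
      rcases Nat.eq_zero_or_pos (Int.gcd m n) with h | h
      · exact absurd (Int.gcd_eq_zero_iff.1 h).1 (by omega)
      · exact h
    by_cases hc : 1 < Int.gcd m n ∧ ((Nat.minFac (Int.gcd m n) : Int) < max m n)
    · -- recursive case: strip p = minFac (gcd m n)
      have hscan : pvScanA m n (max m n) = some (Nat.minFac (Int.gcd m n) : Int) := by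
        rw [hfc, if_pos hc]
      have hp2 : (2 : Int) ≤ (Nat.minFac (Int.gcd m n) : Int) := by
        have := (Nat.minFac_prime (by omega : Int.gcd m n ≠ 1)).two_le
        exact_mod_cast this
      obtain ⟨hdm, hdn⟩ := pvMinFacDvd m n
      -- forget what p is: only p ∣ m, p ∣ n, 2 ≤ p matter from here on
      generalize hPdef : ((Nat.minFac (Int.gcd m n) : Nat) : Int) = P at hscan hp2 hdm hdn
      obtain ⟨m', hm'⟩ := hdm
      obtain ⟨n', hn'⟩ := hdn
      have hfm : PySem.Int.floordiv m P = m' := by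
        rw [hm', PySem.Int.floordiv_eq_ediv_of_pos (by omega : (0:Int) < P),
          Int.mul_ediv_cancel_left _ (by omega : P ≠ 0)]
      have hfn : PySem.Int.floordiv n P = n' := by
        rw [hn', PySem.Int.floordiv_eq_ediv_of_pos (by omega : (0:Int) < P),
          Int.mul_ediv_cancel_left _ (by omega : P ≠ 0)]
      have hlcm : lcmA m n = P * lcmA m' n' := by
        rw [lcmA]
        split
        · next i h => rw [hscan] at h; injection h with h; subst h; rw [hfm, hfn]
        · next h => rw [hscan] at h; cases h
      have hm'1 : 1 ≤ m' := by
        by_contra h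
        push_neg at h
        have h1 : P * m' ≤ 0 := mul_nonpos_of_nonneg_of_nonpos (by omega) (by omega)
        rw [hm'] at hm
        linarith
      have hgmul : (Int.gcd m n : Int) = P * (Int.gcd m' n' : Int) := by
        rw [hm', hn', pvGcdMulLeft P m' n' (by omega)]
      have hnd' : ¬ D_solution n' m' := by
        rintro ⟨h1', h2', h3'⟩
        apply hnd
        refine ⟨by rw [hm']; nlinarith, ?_, ?_⟩
        · obtain ⟨c, hc'⟩ := h2'
          exact ⟨c, by rw [hn', hc', hm']; ring⟩
        · rcases h3' with h | h
          · left; rw [hn', hm', h]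
          · right; rw [hn']; nlinarith
      have hdec : m'.natAbs + n'.natAbs < k := by
        have h1 : m.natAbs = P.natAbs * m'.natAbs := by rw [hm', Int.natAbs_mul]
        have h2 : n.natAbs = P.natAbs * n'.natAbs := by rw [hn', Int.natAbs_mul]
        have hpa : 2 ≤ P.natAbs := by omega
        have hma : 1 ≤ m'.natAbs := by omega
        have hmlt : m'.natAbs < m.natAbs := by
          calc m'.natAbs < 2 * m'.natAbs := by omega
            _ ≤ P.natAbs * m'.natAbs := Nat.mul_le_mul_right _ hpa
            _ = m.natAbs := h1.symm
        have hnle : n'.natAbs ≤ n.natAbs := by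
          rw [h2]; exact Nat.le_mul_of_pos_left _ (by omega)
        omega
      have ih := IH (m'.natAbs + n'.natAbs) hdec m' n' le_rfl hm'1 hnd'
      rw [hlcm, hgmul, hm', hn']
      calc P * lcmA m' n' * (P * (Int.gcd m' n' : Int))
          = P * P * (lcmA m' n' * (Int.gcd m' n' : Int)) := by ring
        _ = P * P * (m' * n') := by rw [ih]
        _ = P * m' * (P * n') := by ring
    · -- base case: the scan finds nothing
      have hscan : pvScanA m n (max m n) = none := by rw [hfc, if_neg hc]
      have hlcm : lcmA m n = m * n := by
        rw [lcmA]
        split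
        · next i h => rw [hscan] at h; cases h
        · next => rfl
      rcases Nat.lt_or_ge 1 (Int.gcd m n) with hg | hg
      · -- gcd > 1 forces (outside D_) n = 0
        have hge : max m n ≤ (Nat.minFac (Int.gcd m n) : Int) := by
          by_contra h
          exact hc ⟨hg, by omega⟩
        have hmfle : (Nat.minFac (Int.gcd m n) : Int) ≤ (Int.gcd m n : Int) := by
          exact_mod_cast Nat.minFac_le hgpos
        have hmm : m ≤ max m n := le_max_left m n
        have hgm : (Int.gcd m n : Int) = m := by omega
        have hmn : m ∣ n := hgm ▸ Int.gcd_dvd_right m n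
        have hm1 : 1 < m := by
          have : (1:Int) < (Int.gcd m n : Int) := by exact_mod_cast hg
          omega
        have hn0 : n = 0 := by
          by_contra hn0
          rcases lt_trichotomy n 0 with h | h | h
          · exact hnd ⟨hm1, hmn, Or.inr h⟩
          · exact hn0 h
          · have := Int.le_of_dvd h hmn
            have hnm : n ≤ max m n := le_max_right m n
            exact hnd ⟨hm1, hmn, Or.inl (by omega)⟩
        rw [hlcm, hn0]; ring
      · have hg1 : Int.gcd m n = 1 := by omega
        rw [hlcm, hg1]; ring

theorem lcmA_mul_gcd (m n : Int) (hm : 1 ≤ m) (hnd : ¬ D_solution n m) :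
    lcmA m n * (Int.gcd m n : Int) = m * n :=
  lcmA_aux (m.natAbs + n.natAbs) m n le_rfl hm hnd

-- ===== VERDICT (by name: the statements are the Claim_ definitions above) =====
theorem solution_spec : Claim_unchanged_solution := by
  intro n m _ hpre hnd
  have hm : 1 ≤ m := hpre
  have hz : ¬(m = 0 ∧ n = 0) := by omega
  have hgpos : 0 < Int.gcd m n := by
    rcases Nat.eq_zero_or_pos (Int.gcd m n) with h | h
    · exact absurd (Int.gcd_eq_zero_iff.1 h).1 (by omega)
    · exact h
  have hgB : pyGcdLoop n m = (Int.gcd m n : Int) := by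
    rw [pyGcdLoop_eq_gcd n m (by omega), Int.gcd_comm]
  have hgdvd : (↑(Int.gcd m n) : Int) ∣ m := Int.gcd_dvd_left m n
  have hgle : (↑(Int.gcd m n) : Int) ≤ m := Int.le_of_dvd (by omega) hgdvd
  have hsecond : lcmA m n = PySem.Int.floordiv (n * m) (pyGcdLoop n m) := by
    rw [hgB, PySem.Int.floordiv_eq_ediv_of_pos (by exact_mod_cast hgpos)]
    have h := lcmA_mul_gcd m n hm hnd
    have : n * m = lcmA m n * (Int.gcd m n : Int) := by rw [h]; ring
    rw [this, Int.mul_ediv_cancel _ (by exact_mod_cast (by omega : (0:Int) < (Int.gcd m n : Int)).ne')]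
  have hfc := find_char m n (m + 1) hz
  show _ = solution_alt n m
  unfold solution solution_alt
  rcases Nat.lt_or_ge 1 (Int.gcd m n) with hg | hg
  · -- common first element: minFac (gcd m n)
    have h2 : 2 ≤ Nat.minFac (Int.gcd m n) := (Nat.minFac_prime (by omega)).two_le
    have hmfle : (Nat.minFac (Int.gcd m n) : Int) ≤ (Int.gcd m n : Int) := by
      exact_mod_cast Nat.minFac_le hgpos
    have hscan : pvScanA m n (m + 1) = some (Nat.minFac (Int.gcd m n) : Int) := by
      rw [hfc, if_pos ⟨hg, by omega⟩]
    have hspf : pySpfLoop (pyGcdLoop n m) 2 = (Nat.minFac (Int.gcd m n) : Int) := by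
      rw [hgB, pySpfLoop_eq _ 2 (by exact_mod_cast hg) le_rfl
        (by rw [Int.toNat_natCast]; exact_mod_cast h2), Int.toNat_natCast]
    rw [hscan]
    simp only [hspf, hsecond]
  · -- gcd = 1: both first elements are 1
    have hg1 : Int.gcd m n = 1 := by omega
    have hscan : pvScanA m n (m + 1) = none := by
      rw [hfc, if_neg (by omega)]
    have hspf : pySpfLoop (pyGcdLoop n m) 2 = 1 := by
      rw [hgB, hg1]
      exact_mod_cast pySpfLoop_one
    rw [hscan]
    simp only [hspf, hsecond]

theorem solution_changed : Claim_changed_solution := by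
  unfold Claim_changed_solution
  refine ⟨by decide, by decide, by decide, ?_, ?_, by decide⟩
  · -- solution 2 2 = [2, 4]
    have hscan : pvScanA 2 2 3 = some 2 := by decide
    have hnone : pvScanA 2 2 (max (2:Int) 2) = none := by decide
    have hl : lcmA 2 2 = 4 := by
      rw [lcmA]
      split
      · next i h => rw [hnone] at h; cases h
      · next => decide
    show solution 2 2 = [2, 4]
    unfold solution
    rw [show (2:Int) + 1 = 3 by decide, hscan, hl]
  · -- solution_alt 2 2 = [2, 2]
    have hg : pyGcdLoop (2:Int) 2 = 2 := by
      rw [pyGcdLoop]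
      norm_num
      rw [pyGcdLoop]
      norm_num
    have hs : pySpfLoop (2:Int) 2 = 2 := by
      rw [pySpfLoop]
      norm_num
    show (let g := pyGcdLoop (2:Int) 2; [pySpfLoop g 2, PySem.Int.floordiv (2 * 2) g]) = [2, 2]
    simp only [hg, hs]
    decide

-- inside D_ with n = m: A's lcm overshoots (strictly exceeds m)
theorem pvLcmASelf_aux (k : Nat) : ∀ m : Int, m.natAbs ≤ k → 1 < m → m < lcmA m m := by
  induction k using Nat.strong_induction_on with
  | _ k IH =>
    intro m hk hm1
    cases hscan : pvScanA m m (max m m) with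
    | some i =>
      obtain ⟨⟨h2, hlt⟩, hdm, _⟩ := pvFindMem hscan
      rw [max_self] at hlt
      obtain ⟨m', hm'⟩ := hdm
      have hfm : PySem.Int.floordiv m i = m' := by
        rw [hm', PySem.Int.floordiv_eq_ediv_of_pos (by omega : (0:Int) < i),
          Int.mul_ediv_cancel_left _ (by omega : i ≠ 0)]
      have hlcm : lcmA m m = i * lcmA m' m' := by
        rw [lcmA]
        split
        · next j h => rw [hscan] at h; injection h with h; subst h; rw [hfm]
        · next h => rw [hscan] at h; cases h
      have hm'1 : 1 < m' := by
        rcases lt_trichotomy m' 1 with h | h | h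
        · have : i * m' ≤ 0 := mul_nonpos_of_nonneg_of_nonpos (by omega) (by omega)
          rw [hm'] at hm1; linarith
        · rw [h, mul_one] at hm'; omega
        · exact h
      have hdec : m'.natAbs < k := by
        have h1 : m.natAbs = i.natAbs * m'.natAbs := by rw [hm', Int.natAbs_mul]
        have hpa : 2 ≤ i.natAbs := by omega
        have hma : 1 ≤ m'.natAbs := by omega
        calc m'.natAbs < 2 * m'.natAbs := by omega
          _ ≤ i.natAbs * m'.natAbs := Nat.mul_le_mul_right _ hpa
          _ = m.natAbs := h1.symm
          _ ≤ k := hk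
      have ih := IH m'.natAbs hdec m' le_rfl hm'1
      rw [hlcm, hm']
      exact mul_lt_mul_of_pos_left ih (by omega)
    | none =>
      have hlcm : lcmA m m = m * m := by
        rw [lcmA]
        split
        · next j h => rw [hscan] at h; cases h
        · next => rfl
      rw [hlcm]
      have := mul_lt_mul_of_pos_left hm1 (by omega : (0:Int) < m)
      linarith

-- inside D_ with n < 0: A's lcm overshoots (strictly below n)
theorem pvLcmANeg_aux (k : Nat) : ∀ m n : Int, m.natAbs + n.natAbs ≤ k → 1 < m → m ∣ n →
    n < 0 → lcmA m n < n := by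
  induction k using Nat.strong_induction_on with
  | _ k IH =>
    intro m n hk hm1 hmn hn0
    cases hscan : pvScanA m n (max m n) with
    | some i =>
      obtain ⟨⟨h2, hlt⟩, hdm, hdn⟩ := pvFindMem hscan
      have hmax : max m n = m := max_eq_left (by omega)
      rw [hmax] at hlt
      obtain ⟨m', hm'⟩ := hdm
      obtain ⟨n', hn'⟩ := hdn
      have hfm : PySem.Int.floordiv m i = m' := by
        rw [hm', PySem.Int.floordiv_eq_ediv_of_pos (by omega : (0:Int) < i),
          Int.mul_ediv_cancel_left _ (by omega : i ≠ 0)]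
      have hfn : PySem.Int.floordiv n i = n' := by
        rw [hn', PySem.Int.floordiv_eq_ediv_of_pos (by omega : (0:Int) < i),
          Int.mul_ediv_cancel_left _ (by omega : i ≠ 0)]
      have hlcm : lcmA m n = i * lcmA m' n' := by
        rw [lcmA]
        split
        · next j h => rw [hscan] at h; injection h with h; subst h; rw [hfm, hfn]
        · next h => rw [hscan] at h; cases h
      have hm'1 : 1 < m' := by
        rcases lt_trichotomy m' 1 with h | h | h
        · have : i * m' ≤ 0 := mul_nonpos_of_nonneg_of_nonpos (by omega) (by omega)
          rw [hm'] at hm1; linarith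
        · rw [h, mul_one] at hm'; omega
        · exact h
      have hn'0 : n' < 0 := by
        rcases lt_trichotomy n' 0 with h | h | h
        · exact h
        · rw [h, mul_zero] at hn'; omega
        · have : 0 < i * n' := mul_pos (by omega) h
          rw [hn'] at hn0; linarith
      have hm'n' : m' ∣ n' := by
        obtain ⟨c, hc⟩ := hmn
        refine ⟨c, mul_left_cancel₀ (by omega : i ≠ 0) ?_⟩
        rw [← hn', hc, hm']; ring
      have hdec : m'.natAbs + n'.natAbs < k := by
        have h1 : m.natAbs = i.natAbs * m'.natAbs := by rw [hm', Int.natAbs_mul]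
        have h2' : n.natAbs = i.natAbs * n'.natAbs := by rw [hn', Int.natAbs_mul]
        have hpa : 2 ≤ i.natAbs := by omega
        have hma : 1 ≤ m'.natAbs := by omega
        have hmlt : m'.natAbs < m.natAbs := by
          calc m'.natAbs < 2 * m'.natAbs := by omega
            _ ≤ i.natAbs * m'.natAbs := Nat.mul_le_mul_right _ hpa
            _ = m.natAbs := h1.symm
        have hnle : n'.natAbs ≤ n.natAbs := by
          rw [h2']; exact Nat.le_mul_of_pos_left _ (by omega)
        omega
      have ih := IH (m'.natAbs + n'.natAbs) hdec m' n' le_rfl hm'1 hm'n' hn'0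
      have := mul_lt_mul_of_pos_left ih (by omega : (0:Int) < i)
      rw [hlcm, hn']
      exact this
    | none =>
      have hlcm : lcmA m n = m * n := by
        rw [lcmA]
        split
        · next j h => rw [hscan] at h; cases h
        · next => rfl
      rw [hlcm]
      have := mul_lt_mul_of_neg_right hm1 hn0
      linarith

theorem solution_tight : Claim_exact_solution := by
  intro n m _ hpre hD
  obtain ⟨hm1, hmn, hor⟩ := hD
  have hgcd : pyGcdLoop n m = m := by
    rw [pyGcdLoop_eq_gcd n m (by omega)]
    have h2 : Int.gcd n m = m.natAbs := Nat.gcd_eq_right (Int.natAbs_dvd_natAbs.2 hmn)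
    rw [h2]; omega
  have hsecondB : PySem.Int.floordiv (n * m) (pyGcdLoop n m) = n := by
    rw [hgcd, PySem.Int.floordiv_eq_ediv_of_pos (by omega : (0:Int) < m),
      Int.mul_ediv_cancel _ (by omega : m ≠ 0)]
  have hne : lcmA m n ≠ n := by
    rcases hor with h | h
    · subst h
      exact ne_of_gt (pvLcmASelf_aux n.natAbs n le_rfl hm1)
    · exact ne_of_lt (pvLcmANeg_aux (m.natAbs + n.natAbs) m n le_rfl hm1 hmn h)
  have key : ∀ x y : Int, [x, lcmA m n] ≠ [y, n] := by
    intro x y hEq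
    simp only [List.cons.injEq] at hEq
    exact hne hEq.2.1
  show solution n m ≠ solution_alt n m
  unfold solution solution_alt
  cases hscan : pvScanA m n (m + 1) with
  | some i =>
    change [i, lcmA m n] ≠ [pySpfLoop (pyGcdLoop n m) 2, PySem.Int.floordiv (n * m) (pyGcdLoop n m)]
    rw [hsecondB]
    exact key i _
  | none =>
    change [1, lcmA m n] ≠ [pySpfLoop (pyGcdLoop n m) 2, PySem.Int.floordiv (n * m) (pyGcdLoop n m)]
    rw [hsecondB]
    exact key 1 _
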